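-- pv_equiv track=rewrite | github.com/xterminal86/name-gen | name-gen.py | GetTrigraphsDistr
-- ===== SOURCE A (Python) =====
-- def GetTrigraphsDistr(lines : list) -> dict:
--   res = {};
--
--   for name in lines:
--     ln = len(name);
--     for i in range(0, ln - 2, 3):
--       fl = name[i];
--       digraph = f"{ name[i + 1] }{ name[i + 2] }";
--
--       if fl not in res:
--         res[fl] = { digraph : 1 };
--       else:
--         if digraph not in res[fl]:
--           res[fl][digraph] = 1;
--         else:
--           res[fl][digraph] += 1;
--
--   return res;
-- ===== SOURCE B (Python) =====
-- def GetTrigraphsDistr(lines):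
--   # Pass 1: extract all (first-letter, digraph) trigraph pairs into one flat list.
--   pairs = []
--   for name in lines:
--     for i in range(0, len(name) - 2, 3):
--       pairs.append((name[i], name[i + 1:i + 3]))
--
--   # Pass 2: count occurrences of each distinct pair in a single flat dict.
--   counts = {}
--   for p in pairs:
--     counts[p] = counts.get(p, 0) + 1
--
--   # Pass 3: assemble the nested dict-of-dicts from the flat counts.
--   res = {}
--   for (fl, dg), c in counts.items():
--     inner = res.get(fl, {})
--     inner[dg] = c
--     res[fl] = inner
--   return res
-- ===== Notes on version B (the rewrite author's own statement) =====
-- stated objective: alternative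
-- what changed: A builds the nested dict-of-dicts in one fused double loop with a three-way branch per trigraph; B decomposes into three flat passes: extract all (first-letter, digraph) pairs into one list, count each distinct pair in a single flat dict, then assemble the nested result from the counts.
import Mathlib
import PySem

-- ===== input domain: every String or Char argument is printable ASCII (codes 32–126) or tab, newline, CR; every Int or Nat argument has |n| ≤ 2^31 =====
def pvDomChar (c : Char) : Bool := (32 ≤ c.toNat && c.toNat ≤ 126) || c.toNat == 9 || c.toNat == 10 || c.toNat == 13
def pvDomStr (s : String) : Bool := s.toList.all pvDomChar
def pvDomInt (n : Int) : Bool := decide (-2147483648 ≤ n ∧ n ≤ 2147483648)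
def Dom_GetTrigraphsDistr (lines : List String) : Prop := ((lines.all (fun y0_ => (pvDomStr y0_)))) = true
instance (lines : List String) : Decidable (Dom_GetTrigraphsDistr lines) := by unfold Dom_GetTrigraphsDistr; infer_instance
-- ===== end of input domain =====

-- B replaces A's fused double loop (nested-dict update with a three-way branch per trigraph)
-- by three flat passes: extract all (first-letter, digraph) pairs, count distinct pairs in one
-- flat dict, then assemble the nested result from the counts (objective: alternative).


-- ===== PORT A =====
-- Literal port of A: for each name, for i in range(0, len(name)-2, 3), update the nested dict
-- with the three-way branch.  name[i] is always in range (i+2 < len), so pyGetD's default is never used.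
def GetTrigraphsDistr (lines : List String) : List (String × List (String × Int)) :=
  let res : PySem.Dict String (PySem.Dict String Int) :=
    lines.foldl (fun res name =>
      let cs := name.toList
      let ln : Int := cs.length
      (PySem.List.pyRange 0 (ln - 2) 3).foldl (fun res i =>
        let fl : String := String.ofList [PySem.List.pyGetD cs i ' ']
        let digraph : String := String.ofList [PySem.List.pyGetD cs (i + 1) ' ', PySem.List.pyGetD cs (i + 2) ' ']
        if ¬ (res.contains fl) then
          res.insert fl (PySem.Dict.ofList [(digraph, (1 : Int))])
        else
          if ¬ ((res.getD fl PySem.Dict.empty).contains digraph) then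
            res.insert fl ((res.getD fl PySem.Dict.empty).insert digraph 1)
          else
            res.insert fl ((res.getD fl PySem.Dict.empty).modify digraph 0 (· + 1))) res) PySem.Dict.empty
  res.items.map (fun kv => (kv.1, kv.2.items))

-- ===== PORT B =====
-- Literal port of B (Source B): three flat passes — extract pairs, count pairs, assemble nested result.
def GetTrigraphsDistr_alt (lines : List String) : List (String × List (String × Int)) :=
  let pairs : List (String × String) :=
    lines.foldl (fun acc name =>
      let cs := name.toList
      (PySem.List.pyRange 0 ((cs.length : Int) - 2) 3).foldl (fun acc i =>
        acc ++ [(String.ofList [PySem.List.pyGetD cs i ' '],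
                 String.ofList (PySem.List.slice cs (some (i + 1)) (some (i + 3))))]) acc) []
  let counts : PySem.Dict (String × String) Int :=
    pairs.foldl (fun d p => d.insert p (d.getD p 0 + 1)) PySem.Dict.empty
  let res : PySem.Dict String (PySem.Dict String Int) :=
    counts.items.foldl (fun res q =>
      let fl := q.1.1
      let dg := q.1.2
      let inner := (res.getD fl PySem.Dict.empty).insert dg q.2
      res.insert fl inner) PySem.Dict.empty
  res.items.map (fun kv => (kv.1, kv.2.items))

-- ===== PRECONDITION & SPEC =====
def Spec_GetTrigraphsDistr (lines : List String) (out : List (String × List (String × Int))) : Prop := out = GetTrigraphsDistr_alt lines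
instance (lines : List String) (out : List (String × List (String × Int))) : Decidable (Spec_GetTrigraphsDistr lines out) := by unfold Spec_GetTrigraphsDistr; infer_instance

-- ===== CLAIM (what is proved, stated in full; the proofs are below) =====
def Claim_equal_GetTrigraphsDistr : Prop := ∀ (lines : List String), Dom_GetTrigraphsDistr lines → Spec_GetTrigraphsDistr lines (GetTrigraphsDistr lines)

-- ===== LEMMAS AND PROOFS =====

-- A's per-trigraph nested-dict update, as a function of the (first-letter, digraph) pair.
def pvStep (res : PySem.Dict String (PySem.Dict String Int)) (p : String × String) :
    PySem.Dict String (PySem.Dict String Int) :=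
  if ¬ (res.contains p.1) then
    res.insert p.1 (PySem.Dict.ofList [(p.2, (1 : Int))])
  else
    if ¬ ((res.getD p.1 PySem.Dict.empty).contains p.2) then
      res.insert p.1 ((res.getD p.1 PySem.Dict.empty).insert p.2 1)
    else
      res.insert p.1 ((res.getD p.1 PySem.Dict.empty).modify p.2 0 (· + 1))

-- B's per-count nested-dict assembly step.
def pvAsm (res : PySem.Dict String (PySem.Dict String Int)) (q : (String × String) × Int) :
    PySem.Dict String (PySem.Dict String Int) :=
  res.insert q.1.1 ((res.getD q.1.1 PySem.Dict.empty).insert q.1.2 q.2)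

-- the pair B extracts at stride index i
def pvPairB (cs : List Char) (i : Int) : String × String :=
  (String.ofList [PySem.List.pyGetD cs i ' '],
   String.ofList (PySem.List.slice cs (some (i + 1)) (some (i + 3))))

def pvPairs (lines : List String) : List (String × String) :=
  lines.flatMap (fun name =>
    (PySem.List.pyRange 0 ((name.toList.length : Int) - 2) 3).map (pvPairB name.toList))

-- assembling a nested dict from distinct pairs S with value function v
def pvBuild (S : List (String × String)) (v : (String × String) → Int) :
    PySem.Dict String (PySem.Dict String Int) :=
  (S.map (fun q => (q, v q))).foldl pvAsm PySem.Dict.empty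

theorem pvBuild_append (S : List (String × String)) (q : String × String)
    (v : (String × String) → Int) :
    pvBuild (S ++ [q]) v = pvAsm (pvBuild S v) (q, v q) := by
  unfold pvBuild
  rw [List.map_append, List.foldl_append]
  rfl

theorem pvBuild_congr {S : List (String × String)} {v w : (String × String) → Int}
    (h : ∀ q ∈ S, v q = w q) : pvBuild S v = pvBuild S w := by
  unfold pvBuild
  rw [List.map_congr_left (fun q hq => by rw [h q hq])]

-- a valid stride index makes A's char-by-char digraph equal B's slice digraph
theorem pvPairA_eq_pairB (cs : List Char) {i : Int} (h0 : 0 ≤ i)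
    (h2 : i + 2 < (cs.length : Int)) :
    (String.ofList [PySem.List.pyGetD cs i ' '],
     String.ofList [PySem.List.pyGetD cs (i + 1) ' ', PySem.List.pyGetD cs (i + 2) ' ']) =
    pvPairB cs i := by
  unfold pvPairB
  have e1 : (i + 2).toNat = (i + 1).toNat + 1 := by omega
  rw [PySem.List.slice_toNat cs (by omega) (by omega)]
  have e2 : (i + 3).toNat - (i + 1).toNat = 2 := by omega
  rw [e2, List.drop_eq_getElem_cons (by omega : (i + 1).toNat < cs.length),
      List.drop_eq_getElem_cons (by omega : (i + 1).toNat + 1 < cs.length),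
      PySem.List.pyGetD_eq_getElem cs ' ' (by omega) (by omega),
      PySem.List.pyGetD_eq_getElem cs ' ' (by omega) (by omega),
      PySem.List.pyGetD_eq_getElem cs ' ' (by omega) (by omega)]
  simp only [List.take_succ_cons, List.take_zero]
  exact Prod.ext rfl (congrArg _ (by rw [getElem_congr rfl e1 (by omega)]))

-- two inserts at distinct keys commute when the first key is already present
theorem pvInsert_comm {κ ν : Type} [BEq κ] [LawfulBEq κ] (d : PySem.Dict κ ν) {k k' : κ}
    (v w : ν) (hne : k ≠ k') (hk : d.contains k = true) :
    (d.insert k v).insert k' w = (d.insert k' w).insert k v := by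
  apply PySem.Dict.ext
  by_cases hk' : d.contains k' = true
  · rw [PySem.Dict.items_insert_of_contains _ w
          (by rw [PySem.Dict.contains_insert]; simp [hk']),
        PySem.Dict.items_insert_of_contains _ v hk,
        PySem.Dict.items_insert_of_contains _ v
          (by rw [PySem.Dict.contains_insert]; simp [hk]),
        PySem.Dict.items_insert_of_contains _ w hk', List.map_map, List.map_map]
    apply List.map_congr_left
    intro p _
    by_cases h1 : p.1 = k <;> by_cases h2 : p.1 = k' <;>
      simp [Function.comp, h1, h2, hne, Ne.symm hne]
  · have hk'' : d.contains k' = false := by simpa using hk'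
    rw [PySem.Dict.items_insert_of_not_contains _ w
          (by rw [PySem.Dict.contains_insert]; simp [hk'', Ne.symm hne]),
        PySem.Dict.items_insert_of_contains _ v hk,
        PySem.Dict.items_insert_of_contains _ v
          (by rw [PySem.Dict.contains_insert]; simp [hk]),
        PySem.Dict.items_insert_of_not_contains _ w hk'', List.map_append]
    simp [Ne.symm hne]

theorem pvBuild_contains (S : List (String × String)) (v : (String × String) → Int)
    (fl : String) : (pvBuild S v).contains fl = true ↔ fl ∈ S.map Prod.fst := by
  induction S using List.reverseRecOn with
  | nil => simp [pvBuild, PySem.Dict.contains_empty]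
  | append_singleton S q ih =>
      rw [pvBuild_append]
      unfold pvAsm
      rw [PySem.Dict.contains_insert]
      simp only [List.map_append, List.mem_append, Bool.or_eq_true, beq_iff_eq]
      rw [← ih]
      simp [or_comm]

theorem pvBuild_get (S : List (String × String)) (v : (String × String) → Int)
    (hS : S.Nodup) (fl dg : String) :
    ((pvBuild S v).getD fl PySem.Dict.empty).get? dg =
      if (fl, dg) ∈ S then some (v (fl, dg)) else none := by
  induction S using List.reverseRecOn with
  | nil => simp [pvBuild, PySem.Dict.getD_empty, PySem.Dict.get?_empty]
  | append_singleton S q ih =>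
      simp only [List.nodup_append] at hS
      have hS' : S.Nodup := hS.1
      have hq : q ∉ S := fun h => hS.2.2 q h q (by simp) rfl
      rw [pvBuild_append]
      unfold pvAsm
      obtain ⟨fl', dg'⟩ := q
      by_cases hfl : fl = fl'
      · subst hfl
        rw [PySem.Dict.getD_insert_self]
        by_cases hdg : dg = dg'
        · subst hdg
          rw [PySem.Dict.get?_insert_self]
          simp
        · rw [PySem.Dict.get?_insert_of_ne _ _ hdg, ih hS']
          simp [hdg]
      · rw [PySem.Dict.getD_insert_of_ne _ _ _ hfl, ih hS']
        simp [hfl]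

-- a pair not yet seen: A's step is B's assembly step with count 1
theorem pvStep_new (S : List (String × String)) (v : (String × String) → Int)
    (hS : S.Nodup) {fl dg : String} (hp : (fl, dg) ∉ S) :
    pvStep (pvBuild S v) (fl, dg) = pvAsm (pvBuild S v) ((fl, dg), 1) := by
  unfold pvStep pvAsm
  by_cases hfl : (pvBuild S v).contains fl = true
  · have hget := pvBuild_get S v hS fl dg
    rw [if_neg hp] at hget
    have hdg : ((pvBuild S v).getD fl PySem.Dict.empty).contains dg = false := by
      rw [PySem.Dict.contains_eq_isSome_get?, hget]
      rfl
    simp [hfl, hdg]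
  · have hfl' : (pvBuild S v).contains fl = false := by simpa using hfl
    simp only [hfl', Bool.false_eq_true, not_false_eq_true, if_true]
    rw [PySem.Dict.getD_of_not_contains _ _ hfl']
    rfl

-- A's step commutes with B's assembly step at a different pair already present
theorem pvStep_asm_comm (B : PySem.Dict String (PySem.Dict String Int)) {fl dg : String}
    (q : String × String) (c : Int) (hfl : B.contains fl = true)
    (hdg : ((B.getD fl PySem.Dict.empty).contains dg) = true) (hq : q ≠ (fl, dg)) :
    pvStep (pvAsm B (q, c)) (fl, dg) = pvAsm (pvStep B (fl, dg)) (q, c) := by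
  obtain ⟨fl', dg'⟩ := q
  by_cases hk : fl' = fl
  · subst hk
    have hdgne : dg' ≠ dg := fun h => hq (by rw [h])
    unfold pvStep pvAsm
    simp only [PySem.Dict.contains_insert_self, PySem.Dict.getD_insert_self,
      PySem.Dict.contains_insert, hdg, hfl, Bool.or_true, PySem.Dict.modify,
      PySem.Dict.insert_insert_self, not_true_eq_false, if_false,
      PySem.Dict.getD_insert_of_ne _ _ _ (Ne.symm hdgne)]
    rw [pvInsert_comm _ _ _ (Ne.symm hdgne) hdg]
  · unfold pvStep pvAsm
    simp only [PySem.Dict.contains_insert, hfl, Bool.or_true, PySem.Dict.modify,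
      PySem.Dict.getD_insert_of_ne _ _ _ hk, hdg, not_true_eq_false, if_false,
      PySem.Dict.getD_insert_of_ne _ _ _ (fun h => hk h.symm)]
    rw [pvInsert_comm _ _ _ (fun h => hk h.symm) hfl]

-- a pair already seen: A's step bumps exactly that pair's assembled count
theorem pvStep_inc (S : List (String × String)) (v : (String × String) → Int)
    (hS : S.Nodup) {fl dg : String} (hp : (fl, dg) ∈ S) :
    pvStep (pvBuild S v) (fl, dg) =
      pvBuild S (fun q => if q = (fl, dg) then v q + 1 else v q) := by
  induction S using List.reverseRecOn with
  | nil => simp at hp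
  | append_singleton S q ih =>
      simp only [List.nodup_append] at hS
      have hS' : S.Nodup := hS.1
      have hq : q ∉ S := fun h => hS.2.2 q h q (by simp) rfl
      rw [pvBuild_append, pvBuild_append]
      rcases List.mem_append.mp hp with hpS | hpq
      · -- p is in S, and q ≠ p
        have hqp : q ≠ (fl, dg) := fun h => hq (h ▸ hpS)
        have hfl : (pvBuild S v).contains fl = true :=
          (pvBuild_contains S v fl).mpr (List.mem_map_of_mem hpS)
        have hdg : ((pvBuild S v).getD fl PySem.Dict.empty).contains dg = true := by
          rw [PySem.Dict.contains_eq_isSome_get?, pvBuild_get S v hS' fl dg, if_pos hpS]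
          rfl
        rw [pvStep_asm_comm _ _ _ hfl hdg hqp, ih hS' hpS, if_neg hqp]
      · -- p = q, the freshly appended pair
        have hpq' : q = (fl, dg) := by
          have := hpq
          simp at this
          exact this.symm
        subst hpq'
        rw [if_pos rfl]
        have hve : pvBuild S (fun r => if r = (fl, dg) then v r + 1 else v r) = pvBuild S v := by
          apply pvBuild_congr
          intro r hrS
          rw [if_neg]
          intro h
          subst h
          exact hq hrS
        rw [hve]
        unfold pvStep pvAsm
        simp only [PySem.Dict.contains_insert_self, PySem.Dict.getD_insert_self,
          PySem.Dict.modify, not_true_eq_false, if_false,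
          PySem.Dict.insert_insert_self]

-- MAIN INVARIANT: A's fused fold equals B's count-then-assemble
theorem pvMain (ps : List (String × String)) :
    ps.foldl pvStep PySem.Dict.empty =
      pvBuild (PySem.Set.ofList ps) (fun q => (ps.count q : Int)) := by
  induction ps using List.reverseRecOn with
  | nil => rfl
  | append_singleton ps p ih =>
      rw [List.foldl_append, List.foldl_cons, List.foldl_nil, ih,
        PySem.Set.ofList_append_singleton]
      by_cases hp : p ∈ ps
      · rw [PySem.Set.add_of_mem ((PySem.Set.mem_ofList ps p).mpr hp)]
        obtain ⟨fl, dg⟩ := p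
        rw [pvStep_inc _ _ (PySem.Set.nodup_ofList ps) ((PySem.Set.mem_ofList _ _).mpr hp)]
        apply pvBuild_congr
        intro q _
        by_cases h : q = (fl, dg)
        · subst h
          simp [List.count_append]
        · have : List.count q [(fl, dg)] = 0 := by
            simp [List.count_singleton]
            exact fun h' => absurd h'.symm (by simpa using h)
          simp [List.count_append, h, this]
      · rw [PySem.Set.add_of_not_mem (fun h => hp ((PySem.Set.mem_ofList ps p).mp h)),
          pvBuild_append]
        obtain ⟨fl, dg⟩ := p
        rw [pvStep_new _ _ (PySem.Set.nodup_ofList ps)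
          (fun h => hp ((PySem.Set.mem_ofList _ _).mp h))]
        have h1 : ((ps ++ [(fl, dg)]).count (fl, dg) : Int) = 1 := by
          simp [List.count_append, List.count_eq_zero_of_not_mem hp]
        rw [h1]
        have : pvBuild (PySem.Set.ofList ps) (fun q => ((ps ++ [(fl, dg)]).count q : Int)) =
            pvBuild (PySem.Set.ofList ps) (fun q => (ps.count q : Int)) := by
          apply pvBuild_congr
          intro q hq
          have hqp : q ≠ (fl, dg) := fun h =>
            hp (h ▸ (PySem.Set.mem_ofList _ _).mp hq)
          have : List.count q [(fl, dg)] = 0 := by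
            simp [List.count_singleton]
            exact fun h' => absurd h'.symm (by simpa using hqp)
          simp [List.count_append, this]
        rw [this]

theorem pvA_eq (lines : List String) :
    GetTrigraphsDistr lines =
      ((pvPairs lines).foldl pvStep PySem.Dict.empty).items.map (fun kv => (kv.1, kv.2.items)) := by
  unfold GetTrigraphsDistr pvPairs
  rw [List.foldl_flatMap]
  apply congrArg
  apply congrArg
  apply PySem.List.foldl_congr_mem
  intro res name _
  rw [List.foldl_map]
  apply PySem.List.foldl_congr_mem
  intro r i hi
  obtain ⟨h0, h1, -⟩ := (PySem.List.mem_pyRange_iff_of_pos (by norm_num) i).mp hi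
  show pvStep r (String.ofList [PySem.List.pyGetD name.toList i ' '],
      String.ofList [PySem.List.pyGetD name.toList (i + 1) ' ',
        PySem.List.pyGetD name.toList (i + 2) ' ']) = pvStep r (pvPairB name.toList i)
  rw [pvPairA_eq_pairB name.toList h0 (by omega)]

theorem pvB_eq (lines : List String) :
    GetTrigraphsDistr_alt lines =
      (pvBuild (PySem.Set.ofList (pvPairs lines))
        (fun q => ((pvPairs lines).count q : Int))).items.map (fun kv => (kv.1, kv.2.items)) := by
  unfold GetTrigraphsDistr_alt
  have hpairs : lines.foldl (fun acc name =>
      (PySem.List.pyRange 0 ((name.toList.length : Int) - 2) 3).foldl (fun acc i =>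
        acc ++ [(String.ofList [PySem.List.pyGetD name.toList i ' '],
                 String.ofList (PySem.List.slice name.toList (some (i + 1)) (some (i + 3))))]) acc)
      ([] : List (String × String)) = pvPairs lines := by
    unfold pvPairs
    rw [show (fun (acc : List (String × String)) (name : String) =>
        (PySem.List.pyRange 0 ((name.toList.length : Int) - 2) 3).foldl (fun acc i =>
          acc ++ [(String.ofList [PySem.List.pyGetD name.toList i ' '],
                   String.ofList (PySem.List.slice name.toList (some (i + 1)) (some (i + 3))))]) acc) =
        (fun acc name =>
          acc ++ (PySem.List.pyRange 0 ((name.toList.length : Int) - 2) 3).map (pvPairB name.toList))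
      from funext fun acc => funext fun name =>
        PySem.List.foldl_append_singleton_eq_map (pvPairB name.toList) _ acc]
    rw [PySem.List.foldl_append_eq_flatMap
      (fun name => (PySem.List.pyRange 0 ((name.toList.length : Int) - 2) 3).map (pvPairB name.toList))
      lines []]
    rfl
  rw [hpairs]
  dsimp only
  rw [PySem.Dict.foldl_insert_getD_add_one_eq_counter, PySem.Dict.items_counter]
  rfl


-- ===== VERDICT (by name: the statement is the Claim_ definition above) =====
theorem GetTrigraphsDistr_spec : Claim_equal_GetTrigraphsDistr := by
  intro lines _
  unfold Spec_GetTrigraphsDistr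
  rw [pvA_eq, pvB_eq, pvMain]
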